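-- pv_equiv track=rewrite | github.com/gavkujo/test-chat | core/intent_model.py | _has_followup
-- ===== SOURCE A (Python) =====
-- from typing import Any, Dict, Iterable, List, Optional, Set, Tuple, cast
--
-- def _has_followup(
--
--     tokens: List[str],
--     anchors: Tuple[str, ...],
--     followups: Tuple[str, ...],
--     window: int,
-- ) -> bool:
--     positions = [idx for idx, token in enumerate(tokens) if token in anchors]
--     if not positions:
--         return False
--     for pos in positions:
--         end = min(len(tokens), pos + window + 1)
--         for idx in range(pos + 1, end):
--             if tokens[idx] in followups:
--                 return True
--     return False
-- ===== SOURCE B (Python) =====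
-- def _has_followup(tokens, anchors, followups, window):
--     anchor_set = set(anchors)
--     followup_set = set(followups)
--     last = None
--     for i, tok in enumerate(tokens):
--         if tok in followup_set and last is not None and i - last <= window:
--             return True
--         if tok in anchor_set:
--             last = i
--     return False
-- ===== Notes on version B (the rewrite author's own statement) =====
-- stated objective: faster
-- what changed: Replaced the per-anchor inner window scan with a single left-to-right pass that tracks the index of the most recent anchor and checks each followup token against it, with set-based membership.
import Mathlib
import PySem

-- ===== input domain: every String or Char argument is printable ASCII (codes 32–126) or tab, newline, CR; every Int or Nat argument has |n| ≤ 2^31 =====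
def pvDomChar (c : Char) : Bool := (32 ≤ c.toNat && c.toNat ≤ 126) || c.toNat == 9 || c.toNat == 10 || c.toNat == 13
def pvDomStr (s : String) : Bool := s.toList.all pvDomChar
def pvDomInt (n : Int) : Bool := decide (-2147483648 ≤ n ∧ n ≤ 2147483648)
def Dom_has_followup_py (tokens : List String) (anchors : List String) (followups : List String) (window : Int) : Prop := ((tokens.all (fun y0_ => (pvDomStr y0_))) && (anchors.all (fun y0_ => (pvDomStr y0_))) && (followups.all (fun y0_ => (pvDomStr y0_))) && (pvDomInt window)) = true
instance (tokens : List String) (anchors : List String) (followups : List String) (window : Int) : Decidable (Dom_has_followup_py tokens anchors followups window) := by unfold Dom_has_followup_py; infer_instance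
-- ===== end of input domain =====

-- ===== PORT A =====
def has_followup_py (tokens : List String) (anchors : List String) (followups : List String) (window : Int) : Bool :=
  let positions := ((PySem.List.enumerate tokens 0).filter (fun p => anchors.contains p.2)).map (fun p => p.1)
  if positions.isEmpty then false
  else positions.any (fun pos =>
    let e := min (Int.ofNat tokens.length) (pos + window + 1)
    (PySem.List.pyRange (pos + 1) e 1).any (fun idx =>
      match PySem.List.pyGet? tokens idx with
      | some t => followups.contains t
      | none => false))

-- ===== PORT B =====
def altGo (aset fset : PySem.Set String) (window : Int) : List (Int × String) → Option Int → Bool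
  | [], _ => false
  | (i, t) :: rest, last =>
    if fset.contains t && (match last with | some l => decide (i - l ≤ window) | none => false) then
      true
    else
      altGo aset fset window rest (if aset.contains t then some i else last)

def has_followup_py_alt (tokens : List String) (anchors : List String) (followups : List String) (window : Int) : Bool :=
  altGo (PySem.Set.ofList anchors) (PySem.Set.ofList followups) window (PySem.List.enumerate tokens 0) none

-- ===== PRECONDITION & SPEC =====
def Spec_has_followup_py (tokens : List String) (anchors : List String) (followups : List String) (window : Int) (out : Bool) : Prop := out = has_followup_py_alt tokens anchors followups window
instance (tokens : List String) (anchors : List String) (followups : List String) (window : Int) (out : Bool) : Decidable (Spec_has_followup_py tokens anchors followups window out) := by unfold Spec_has_followup_py; infer_instance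

-- ===== CLAIM (what is proved, stated in full; the proofs are below) =====
def Claim_equal_has_followup_py : Prop := ∀ (tokens : List String) (anchors : List String) (followups : List String) (window : Int), Dom_has_followup_py tokens anchors followups window → Spec_has_followup_py tokens anchors followups window (has_followup_py tokens anchors followups window)

-- ===== LEMMAS AND PROOFS =====

-- both programs detect: some anchor at p is followed by a followup at q within the window
def Good (tokens anchors followups : List String) (window : Int) : Prop :=
  ∃ p q : Nat, p < q ∧ q < tokens.length ∧ (tokens.getD p "") ∈ anchors ∧
    (tokens.getD q "") ∈ followups ∧ (q : Int) ≤ (p : Int) + window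

theorem A_true_iff (tokens anchors followups : List String) (window : Int) :
    has_followup_py tokens anchors followups window = true ↔
      Good tokens anchors followups window := by
  unfold Good
  have key : ∀ (P : List Int) (f : Int → Bool), (if P.isEmpty then false else P.any f) = P.any f := by
    intro P f; cases P <;> simp
  unfold has_followup_py
  simp only [key, List.any_eq_true, List.mem_map, List.mem_filter,
    PySem.List.mem_enumerate_iff, PySem.List.mem_pyRange_one]
  constructor
  · rintro ⟨pos, ⟨⟨i, w⟩, ⟨⟨k, hk, hpair⟩, hanch⟩, hfst⟩, idx, ⟨hge, hlt⟩, hmatch⟩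
    simp only [Prod.mk.injEq] at hpair
    obtain ⟨hi, hw⟩ := hpair
    subst hw
    simp only at hfst hanch
    -- pos = i = 0 + k
    have hpos : pos = (k : Int) := by omega
    subst hpos
    have hidx0 : 0 ≤ idx := by omega
    have hidxlen : idx < (tokens.length : Int) := by
      simp only [Int.ofNat_eq_natCast] at hlt; omega
    rw [PySem.List.pyGet?_eq_some_getElem tokens hidx0 hidxlen] at hmatch
    have hlt' : idx.toNat < tokens.length := by omega
    refine ⟨k, idx.toNat, by omega, hlt', ?_, ?_, ?_⟩
    · rw [List.getD_eq_getElem _ _ hk]; simpa using hanch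
    · rw [List.getD_eq_getElem _ _ hlt']; simpa using hmatch
    · simp only [Int.ofNat_eq_natCast] at hlt; omega
  · rintro ⟨p, q, hpq, hqlen, hanch, hfol, hwin⟩
    have hplen : p < tokens.length := by omega
    refine ⟨(p : Int), ⟨(0 + (p:Int), tokens[p]), ⟨⟨p, hplen, rfl⟩, ?_⟩, by simp⟩, (q : Int), ⟨by omega, ?_⟩, ?_⟩
    · simp only; rw [List.getD_eq_getElem _ _ hplen] at hanch; simpa using hanch
    · simp only [Int.ofNat_eq_natCast]; omega
    · rw [PySem.List.pyGet?_eq_some_getElem tokens (by omega) (by omega)]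
      rw [List.getD_eq_getElem _ _ hqlen] at hfol
      simpa using hfol

theorem altGo_cons_none (aset fset : List String) (window s : Int) (t : String) (E : List (Int × String)) :
    altGo aset fset window ((s, t) :: E) none
      = altGo aset fset window E (if aset.contains t then some s else none) := by
  show (if fset.contains t && false then true else _) = _
  simp

theorem altGo_cons_some (aset fset : List String) (window s l : Int) (t : String) (E : List (Int × String)) :
    altGo aset fset window ((s, t) :: E) (some l)
      = if fset.contains t && decide (s - l ≤ window) then true
        else altGo aset fset window E (if aset.contains t then some s else some l) := rfl

theorem altGo_true_iff (aset fset : List String) (window : Int) (toks : List String)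
    (s : Int) (last : Option Int) (hlast : ∀ l, last = some l → l < s) :
    altGo aset fset window (PySem.List.enumerate toks s) last = true ↔
      ∃ q : Nat, q < toks.length ∧ (toks.getD q "") ∈ fset ∧
        ((∃ p : Nat, p < q ∧ (toks.getD p "") ∈ aset ∧ (q : Int) - (p : Int) ≤ window)
         ∨ (∃ l, last = some l ∧ (s + (q : Int)) - l ≤ window)) := by
  induction toks generalizing s last with
  | nil => simp [PySem.List.enumerate, altGo]
  | cons t rest ih =>
    rw [PySem.List.enumerate_cons]
    by_cases ha : t ∈ aset
    · have hca : aset.contains t = true := by simpa using ha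
      rcases last with _ | l0
      · rw [altGo_cons_none, if_pos hca,
            ih (s+1) (some s) (by intro l hl; simp at hl; omega)]
        constructor
        · rintro ⟨q, hq, hfq, hcase⟩
          refine ⟨q+1, by simp only [List.length_cons]; omega,
            by simpa only [List.getD_cons_succ] using hfq, Or.inl ?_⟩
          rcases hcase with ⟨p, hp, hap, hw⟩ | ⟨l, hl, hw⟩
          · exact ⟨p+1, by omega, by simpa only [List.getD_cons_succ] using hap,
              by push_cast at hw ⊢; omega⟩
          · simp at hl; subst hl
            exact ⟨0, by omega, by simpa using ha, by push_cast at hw ⊢; omega⟩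
        · rintro ⟨q, hq, hfq, hcase⟩
          match q with
          | 0 =>
            rcases hcase with ⟨p, hp, _⟩ | ⟨l, hl, _⟩
            · omega
            · simp at hl
          | q+1 =>
            refine ⟨q, by simp only [List.length_cons] at hq; omega,
              by simpa only [List.getD_cons_succ] using hfq, ?_⟩
            rcases hcase with ⟨p, hp, hap, hw⟩ | ⟨l, hl, hw⟩
            · match p with
              | 0 => exact Or.inr ⟨s, rfl, by push_cast at hw ⊢; omega⟩
              | p+1 => exact Or.inl ⟨p, by omega,
                  by simpa only [List.getD_cons_succ] using hap, by push_cast at hw ⊢; omega⟩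
            · simp at hl
      · have hl0 : l0 < s := hlast l0 rfl
        rw [altGo_cons_some]
        by_cases hhit : t ∈ fset ∧ s - l0 ≤ window
        · rw [if_pos (by simp [hhit.1, hhit.2])]
          constructor
          · intro _
            exact ⟨0, by simp, by simpa using hhit.1,
              Or.inr ⟨l0, rfl, by have := hhit.2; push_cast; omega⟩⟩
          · intro _; rfl
        · rw [if_neg (by rcases Decidable.not_and_iff_not_or_not.mp hhit with h | h <;> simp [h]),
              if_pos hca, ih (s+1) (some s) (by intro l hl; simp at hl; omega)]
          constructor
          · rintro ⟨q, hq, hfq, hcase⟩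
            refine ⟨q+1, by simp only [List.length_cons]; omega,
              by simpa only [List.getD_cons_succ] using hfq, Or.inl ?_⟩
            rcases hcase with ⟨p, hp, hap, hw⟩ | ⟨l, hl, hw⟩
            · exact ⟨p+1, by omega, by simpa only [List.getD_cons_succ] using hap,
                by push_cast at hw ⊢; omega⟩
            · simp at hl; subst hl
              exact ⟨0, by omega, by simpa using ha, by push_cast at hw ⊢; omega⟩
          · rintro ⟨q, hq, hfq, hcase⟩
            match q with
            | 0 =>
              exfalso
              rcases hcase with ⟨p, hp, _⟩ | ⟨l, hl, hw⟩
              · omega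
              · simp at hl; subst hl
                exact hhit ⟨by simpa using hfq, by push_cast at hw; omega⟩
            | q+1 =>
              refine ⟨q, by simp only [List.length_cons] at hq; omega,
                by simpa only [List.getD_cons_succ] using hfq, ?_⟩
              rcases hcase with ⟨p, hp, hap, hw⟩ | ⟨l, hl, hw⟩
              · match p with
                | 0 => exact Or.inr ⟨s, rfl, by push_cast at hw ⊢; omega⟩
                | p+1 => exact Or.inl ⟨p, by omega,
                    by simpa only [List.getD_cons_succ] using hap, by push_cast at hw ⊢; omega⟩
              · simp at hl; subst hl
                exact Or.inr ⟨s, rfl, by push_cast at hw ⊢; omega⟩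
    · have hca : aset.contains t = false := by simpa using ha
      rcases last with _ | l0
      · rw [altGo_cons_none, if_neg (by simpa using ha),
            ih (s+1) none (by intro l hl; simp at hl)]
        constructor
        · rintro ⟨q, hq, hfq, hcase⟩
          refine ⟨q+1, by simp only [List.length_cons]; omega,
            by simpa only [List.getD_cons_succ] using hfq, ?_⟩
          rcases hcase with ⟨p, hp, hap, hw⟩ | ⟨l, hl, _⟩
          · exact Or.inl ⟨p+1, by omega, by simpa only [List.getD_cons_succ] using hap,
              by push_cast at hw ⊢; omega⟩
          · simp at hl
        · rintro ⟨q, hq, hfq, hcase⟩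
          match q with
          | 0 =>
            rcases hcase with ⟨p, hp, _⟩ | ⟨l, hl, _⟩
            · omega
            · simp at hl
          | q+1 =>
            refine ⟨q, by simp only [List.length_cons] at hq; omega,
              by simpa only [List.getD_cons_succ] using hfq, ?_⟩
            rcases hcase with ⟨p, hp, hap, hw⟩ | ⟨l, hl, hw⟩
            · match p with
              | 0 => exact absurd (by simpa using hap) ha
              | p+1 => exact Or.inl ⟨p, by omega,
                  by simpa only [List.getD_cons_succ] using hap, by push_cast at hw ⊢; omega⟩
            · simp at hl
      · have hl0 : l0 < s := hlast l0 rfl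
        rw [altGo_cons_some]
        by_cases hhit : t ∈ fset ∧ s - l0 ≤ window
        · rw [if_pos (by simp [hhit.1, hhit.2])]
          constructor
          · intro _
            exact ⟨0, by simp, by simpa using hhit.1,
              Or.inr ⟨l0, rfl, by have := hhit.2; push_cast; omega⟩⟩
          · intro _; rfl
        · rw [if_neg (by rcases Decidable.not_and_iff_not_or_not.mp hhit with h | h <;> simp [h]),
              if_neg (by simpa using ha), ih (s+1) (some l0) (by intro l hl; simp at hl; omega)]
          constructor
          · rintro ⟨q, hq, hfq, hcase⟩
            refine ⟨q+1, by simp only [List.length_cons]; omega,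
              by simpa only [List.getD_cons_succ] using hfq, ?_⟩
            rcases hcase with ⟨p, hp, hap, hw⟩ | ⟨l, hl, hw⟩
            · exact Or.inl ⟨p+1, by omega, by simpa only [List.getD_cons_succ] using hap,
                by push_cast at hw ⊢; omega⟩
            · simp at hl; subst hl
              exact Or.inr ⟨l0, rfl, by push_cast at hw ⊢; omega⟩
          · rintro ⟨q, hq, hfq, hcase⟩
            match q with
            | 0 =>
              exfalso
              rcases hcase with ⟨p, hp, _⟩ | ⟨l, hl, hw⟩
              · omega
              · simp at hl; subst hl
                exact hhit ⟨by simpa using hfq, by push_cast at hw; omega⟩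
            | q+1 =>
              refine ⟨q, by simp only [List.length_cons] at hq; omega,
                by simpa only [List.getD_cons_succ] using hfq, ?_⟩
              rcases hcase with ⟨p, hp, hap, hw⟩ | ⟨l, hl, hw⟩
              · match p with
                | 0 => exact absurd (by simpa using hap) ha
                | p+1 => exact Or.inl ⟨p, by omega,
                    by simpa only [List.getD_cons_succ] using hap, by push_cast at hw ⊢; omega⟩
              · simp at hl; subst hl
                exact Or.inr ⟨l0, rfl, by push_cast at hw ⊢; omega⟩

theorem B_true_iff (tokens anchors followups : List String) (window : Int) :
    has_followup_py_alt tokens anchors followups window = true ↔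
      Good tokens anchors followups window := by
  unfold has_followup_py_alt
  rw [altGo_true_iff _ _ _ _ _ _ (by intro l hl; simp at hl)]
  unfold Good
  constructor
  · rintro ⟨q, hq, hfq, ⟨p, hp, hap, hw⟩ | ⟨l, hl, _⟩⟩
    · exact ⟨p, q, hp, hq, by simpa [PySem.Set.mem_ofList] using hap,
        by simpa [PySem.Set.mem_ofList] using hfq, by omega⟩
    · simp at hl
  · rintro ⟨p, q, hpq, hq, hap, hfq, hw⟩
    exact ⟨q, hq, by simpa [PySem.Set.mem_ofList] using hfq,
      Or.inl ⟨p, hpq, by simpa [PySem.Set.mem_ofList] using hap, by omega⟩⟩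

-- ===== VERDICT (by name: the statement is the Claim_ definition above) =====
theorem has_followup_py_spec : Claim_equal_has_followup_py := by
  intro tokens anchors followups window _
  unfold Spec_has_followup_py
  rw [Bool.eq_iff_iff, A_true_iff, B_true_iff]
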